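/-
  jsmn: what the call sites of `jsmn_run` / `jsmn_main` share, for both binaries (no machine code here).
    RunPre.toksW      the token window of a `jsmn_run` call, NULL or not (`RegionW`: all the frame arguments need)
    Region.callee     a caller's data region is a data region of its callee (whose stack window lies inside the caller's)
    toksArg_frame     the `tokens` argument through stores elsewhere (registered as a `v3_frame` rule)
-/
import Prog.Jsmn.State

namespace X86
namespace J6
open X86.User (CodeAt RegsKept Span FlagsOK Layout toNat_add_ofNat toNat_ofNat_lt' add_ofNat_add)
open Jsmn

set_option linter.unusedVariables false

/-- The token window of a `jsmn_run` call, NULL or not. -/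
theorem RunPre.toksW {b : Bin} {n : User.Layout} {v0 : User.State} {ret jsA tb : Word} {js : List UInt8} {numTokens : Nat} {toks : Option Tokens}
    (h : RunPre b n v0 ret jsA tb js numTokens toks) : RegionW b n v0 b.useRun tb (toksBytes b.cfg numTokens toks) := by
  rcases h.toksR with h0 | hR
  · cases toks with
    | none => subst h0; exact ⟨by simp [toksBytes], by simp [toksBytes], by simp [toksBytes]⟩
    | some ts => exact absurd h0 h.toksArg.1
  · exact hR.weak

/-- A caller's data region is a data region of its callee: the callee's view `v1` has its stack pointer below the caller's return address, and
its stack window (`use'` bytes) inside the caller's (`use` bytes). -/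
theorem Region.callee {b : Bin} {n : User.Layout} {v0 v1 : User.State} {use use' : Nat} {a : Word} {len : Nat} (h : Region b n v0 use a len)
    (h1 : (v1.reg .rsp).toNat + 8 ≤ (v0.reg .rsp).toNat) (h2 : (v0.reg .rsp).toNat - use ≤ (v1.reg .rsp).toNat - use') :
    Region b n v1 use' a len :=
  ⟨h.lo, h.hi, h.img, by have := h.stk; omega⟩

/-- The `tokens` argument (NULL, or the array), moved to a memory that agrees on the array. -/
theorem toksArg_frame {cfg : Jsmn.Config} {μ ν : User.Mem} {tb : Word} {numTokens : Nat} {tk : Option Tokens} (h : ToksArg cfg μ tb numTokens tk)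
    (he : User.Mem.EqOn tb.toNat (tb.toNat + toksBytes cfg numTokens tk) μ ν) (hlt : tb.toNat + toksBytes cfg numTokens tk < 2 ^ 64) :
    ToksArg cfg ν tb numTokens tk := by
  cases tk with
  | none => exact h
  | some ts =>
    obtain ⟨h0, hl, ht⟩ := h
    simp only [toksBytes] at he hlt
    exact ⟨h0, hl, ht.frame (by rw [hl]; exact he) (by rw [hl]; exact hlt)⟩

end J6
end X86

macro_rules
  | `(tactic| v3_frame_rule $h) => `(tactic| (with_reducible refine X86.J6.toksArg_frame $h ?eqon ?side))
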